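-- pv_equiv track=rewrite | github.com/EugeneGouws/TimePyBling | reader/exam_clash.py | build_clash_graph
-- ===== SOURCE A (Python) =====
-- def build_clash_graph(student_sets: dict) -> dict:
--     """
--     Build an adjacency set for each subject.
--
--     Two subjects clash if their student sets have any overlap.
--
--     Returns
--     -------
--     dict  { subject_label -> set of subject_labels it clashes with }
--     """
--     subjects = list(student_sets.keys())
--     graph    = {s: set() for s in subjects}
--
--     for i in range(len(subjects)):
--         for j in range(i + 1, len(subjects)):
--             a, b = subjects[i], subjects[j]
--             if not student_sets[a].isdisjoint(student_sets[b]):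
--                 graph[a].add(b)
--                 graph[b].add(a)
--
--     return graph
-- ===== SOURCE B (Python) =====
-- def build_clash_graph(student_sets: dict) -> dict:
--     """
--     Build an adjacency set for each subject.
--
--     Two subjects clash if their student sets have any overlap.
--
--     Faster strategy: invert to a student -> [subjects] index; every two
--     subjects sharing a student clash, so union each co-enrolment list into
--     the per-subject neighbour sets, then emit neighbours per subject.
--     """
--     co = {}  # student -> list of subjects containing that student
--     for subj, studs in student_sets.items():
--         for st in studs:
--             co.setdefault(st, []).append(subj)
--
--     nb = {s: set() for s in student_sets}
--     for st in co:
--         subs = co[st]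
--         for a in subs:
--             nb[a].update(subs)
--
--     return {s: {t for t in student_sets if t in nb[s] and t != s} for s in student_sets}
-- ===== Notes on version B (the rewrite author's own statement) =====
-- stated objective: faster
-- what changed: Instead of testing every subject pair for set overlap, B inverts the dict into a student -> subjects index, unions each co-enrolment list into per-subject neighbour sets with set.update, and emits each subject's neighbours in key order.
import Mathlib
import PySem

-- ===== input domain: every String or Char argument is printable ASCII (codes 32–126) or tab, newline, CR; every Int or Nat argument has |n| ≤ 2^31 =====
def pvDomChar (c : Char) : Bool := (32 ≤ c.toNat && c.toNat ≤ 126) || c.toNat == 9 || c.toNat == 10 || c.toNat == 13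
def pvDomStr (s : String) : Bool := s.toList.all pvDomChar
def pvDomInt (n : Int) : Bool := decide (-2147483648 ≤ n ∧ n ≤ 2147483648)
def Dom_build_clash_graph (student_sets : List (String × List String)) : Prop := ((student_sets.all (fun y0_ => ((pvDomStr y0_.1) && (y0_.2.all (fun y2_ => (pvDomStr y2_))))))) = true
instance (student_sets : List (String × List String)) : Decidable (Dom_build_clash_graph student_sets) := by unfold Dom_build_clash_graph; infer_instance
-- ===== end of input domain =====

-- B inverts the dict to a student -> subjects index and unions each co-enrolment list into
-- per-subject neighbour sets (measured faster than A's pairwise set-overlap scan); equal output proved.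

-- ===== PORT A =====
-- A, transliterated: subjects = keys; graph = {s: set() for s in subjects};
-- double index loop over subject pairs; add both directions when sets overlap.
def build_clash_graph (student_sets : List (String × List String)) : List (String × List String) :=
  let subjects := student_sets.map (fun p => p.1)
  let d : PySem.Dict String (List String) := PySem.Dict.mk student_sets
  let graph0 : PySem.Dict String (PySem.Set String) :=
    subjects.foldl (fun g s => g.insert s PySem.Set.empty) PySem.Dict.empty
  let n := PySem.List.len subjects
  let graph :=
    (PySem.List.pyRange 0 n).foldl (fun g i =>
      (PySem.List.pyRange (i+1) n).foldl (fun g j =>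
        let a := PySem.List.pyGetD subjects i ""
        let b := PySem.List.pyGetD subjects j ""
        if !(PySem.Set.isdisjoint (d.getD a []) (d.getD b [])) then
          (g.modify a [] (fun s => PySem.Set.add s b)).modify b [] (fun s => PySem.Set.add s a)
        else g) g) graph0
  graph.items

-- ===== PORT B =====
def build_clash_graph_alt (student_sets : List (String × List String)) : List (String × List String) :=
  let co : PySem.Dict String (List String) :=
    student_sets.foldl (fun co p =>
      p.2.foldl (fun co st => co.modify st [] (fun l => l ++ [p.1])) co) PySem.Dict.empty
  let nb0 : PySem.Dict String (PySem.Set String) :=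
    (student_sets.map (fun p => p.1)).foldl (fun g s => g.insert s PySem.Set.empty)
      PySem.Dict.empty
  let nb := co.keys.foldl (fun g st =>
    let subs := co.getD st []
    subs.foldl (fun g a => g.modify a [] (fun x => PySem.Set.update x subs)) g) nb0
  student_sets.map (fun p =>
    (p.1, PySem.Set.ofList ((student_sets.map (fun q => q.1)).filter
      (fun t => PySem.Set.contains (nb.getD p.1 []) t && !(t == p.1)))))

-- ===== PRECONDITION & SPEC =====
-- Pre_ admits exactly the lists that encode a Python dict[str, set[str]]:
-- keys pairwise distinct and each value list holding distinct elements.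
def Pre_build_clash_graph (student_sets : List (String × List String)) : Prop :=
  (student_sets.map (fun p => p.1)).Nodup ∧ ∀ p ∈ student_sets, p.2.Nodup
instance (student_sets : List (String × List String)) : Decidable (Pre_build_clash_graph student_sets) := by
  unfold Pre_build_clash_graph; infer_instance

def pvWitness_build_clash_graph : (List (String × List String)) :=
  [("A", ["x"]), ("B", ["x", "y"]), ("C", ["z"])]

def Spec_build_clash_graph (student_sets : List (String × List String)) (out : List (String × List String)) : Prop := out = build_clash_graph_alt student_sets
instance (student_sets : List (String × List String)) (out : List (String × List String)) : Decidable (Spec_build_clash_graph student_sets out) := by unfold Spec_build_clash_graph; infer_instance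

-- ===== CLAIM (what is proved, stated in full; the proofs are below) =====
def Claim_equal_build_clash_graph : Prop := ∀ (student_sets : List (String × List String)), Dom_build_clash_graph student_sets → Pre_build_clash_graph student_sets → Spec_build_clash_graph student_sets (build_clash_graph student_sets)

-- ===== LEMMAS AND PROOFS =====

-- the value dict lookup and the clash test, as the ports compute them
def pvVal (ss : List (String × List String)) (s : String) : List String :=
  (PySem.Dict.mk ss).getD s []

def pvClash (ss : List (String × List String)) (a b : String) : Bool :=
  !(PySem.Set.isdisjoint (pvVal ss a) (pvVal ss b))

def pvNbr (ss : List (String × List String)) (s t : String) : Bool :=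
  (!(t == s)) && pvClash ss s t

-- canonical description both ports are reduced to
def pvCanon (ss : List (String × List String)) : List (String × List String) :=
  ss.map (fun p => (p.1, (ss.map (fun q => q.1)).filter (pvNbr ss p.1)))

-- ---------- A side ----------

def pvTailsFold {β : Type} (H : String → List String → β → β) : List String → β → β
  | [], g => g
  | a :: rest, g => pvTailsFold H rest (H a rest g)

def pvStepA (ss : List (String × List String)) (a b : String)
    (g : PySem.Dict String (PySem.Set String)) : PySem.Dict String (PySem.Set String) :=
  if pvClash ss a b then
    (g.modify a [] (fun s => PySem.Set.add s b)).modify b [] (fun s => PySem.Set.add s a)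
  else g

def pvH (ss : List (String × List String)) (a : String) (rest : List String)
    (g : PySem.Dict String (PySem.Set String)) : PySem.Dict String (PySem.Set String) :=
  rest.foldl (fun g b => pvStepA ss a b g) g

def pvAdds (ss : List (String × List String)) (s a b : String) : List String :=
  if pvClash ss a b then ((if a = s then [b] else []) ++ (if b = s then [a] else [])) else []

def pvSeq (ss : List (String × List String)) (s : String) : List String → List String
  | [] => []
  | a :: rest => rest.flatMap (pvAdds ss s a) ++ pvSeq ss s rest

lemma pv_range_tails {β : Type} (d : String) (H : String → List String → β → β) :
    ∀ (xs : List String) (g : β),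
      (List.range xs.length).foldl (fun g k => H (xs.getD k d) (xs.drop (k+1)) g) g
        = pvTailsFold H xs g := by
  intro xs
  induction xs with
  | nil => intro g; simp [pvTailsFold]
  | cons x t ih =>
      intro g
      rw [List.length_cons, List.range_succ_eq_map, List.foldl_cons, List.foldl_map]
      simp only [List.getD_cons_zero, List.drop_succ_cons, List.drop_zero, List.getD_cons_succ]
      rw [pvTailsFold]
      exact ih (H x t g)

lemma pvA_eq_tails (ss : List (String × List String)) (g0 : PySem.Dict String (PySem.Set String)) :
    (PySem.List.pyRange 0 (PySem.List.len (ss.map (fun p => p.1)))).foldl (fun g i =>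
      (PySem.List.pyRange (i+1) (PySem.List.len (ss.map (fun p => p.1)))).foldl (fun g j =>
        let a := PySem.List.pyGetD (ss.map (fun p => p.1)) i ""
        let b := PySem.List.pyGetD (ss.map (fun p => p.1)) j ""
        if !(PySem.Set.isdisjoint ((PySem.Dict.mk ss).getD a []) ((PySem.Dict.mk ss).getD b [])) then
          (g.modify a [] (fun s => PySem.Set.add s b)).modify b [] (fun s => PySem.Set.add s a)
        else g) g) g0
      = pvTailsFold (pvH ss) (ss.map (fun p => p.1)) g0 := by
  set xs := ss.map (fun p => p.1) with hxs
  have hlen : PySem.List.len xs = (xs.length : Int) := by simp [PySem.List.len]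
  rw [hlen, PySem.List.pyRange_zero_nat, List.foldl_map]
  rw [← pv_range_tails "" (pvH ss) xs g0]
  apply PySem.List.foldl_congr_mem
  intro g k hk
  show _ = pvH ss (xs.getD k "") (xs.drop (k+1)) g
  have h1 : PySem.List.pyGetD xs (↑k) "" = xs.getD k "" := PySem.List.pyGetD_natCast xs k ""
  have h2 : ((k : Int) + 1) = ((k + 1 : Nat) : Int) := by push_cast; ring
  rw [pvH]
  have := PySem.List.foldl_pyRange_pyGetD xs "" (fun g b => pvStepA ss (xs.getD k "") b g) g
      (a := (k : Int) + 1) (by positivity)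
  rw [hlen] at this
  have h3 : ((k : Int) + 1).toNat = k + 1 := by omega
  rw [h3, h2] at this
  rw [h2, ← this]
  apply PySem.List.foldl_congr_mem
  intro acc j hj
  simp only [pvStepA, pvClash, pvVal, h1]
  rfl

lemma pv_stepA_getD (ss : List (String × List String)) (a b s : String)
    (g : PySem.Dict String (PySem.Set String)) :
    (pvStepA ss a b g).getD s [] = (pvAdds ss s a b).foldl PySem.Set.add (g.getD s []) := by
  unfold pvStepA pvAdds
  have hiff : ∀ (x y : String), ¬ x = y → ¬ y = x := fun x y h h2 => h h2.symm
  by_cases hc : pvClash ss a b = true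
  · by_cases hsb : s = b <;> by_cases hsa : s = a
    · subst hsb; subst hsa
      simp [hc, List.foldl]
    · subst hsb
      simp [PySem.Dict.getD_modify, hc, hsa, hiff _ _ hsa, List.foldl]
    · subst hsa
      simp [PySem.Dict.getD_modify, hc, hsb, hiff _ _ hsb, List.foldl]
    · simp [PySem.Dict.getD_modify, hc, hsa, hsb, hiff _ _ hsa, hiff _ _ hsb]
  · simp [hc]

lemma pv_inner_getD (ss : List (String × List String)) (a s : String) :
    ∀ (rest : List String) (g : PySem.Dict String (PySem.Set String)),
      (pvH ss a rest g).getD s [] = (rest.flatMap (pvAdds ss s a)).foldl PySem.Set.add (g.getD s []) := by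
  intro rest
  induction rest with
  | nil => intro g; simp [pvH]
  | cons b t ih =>
      intro g
      rw [pvH, List.foldl_cons, ← pvH, ih, List.flatMap_cons, List.foldl_append, pv_stepA_getD]

lemma pv_tails_getD (ss : List (String × List String)) (s : String) :
    ∀ (xs : List String) (g : PySem.Dict String (PySem.Set String)),
      (pvTailsFold (pvH ss) xs g).getD s [] = (pvSeq ss s xs).foldl PySem.Set.add (g.getD s []) := by
  intro xs
  induction xs with
  | nil => intro g; simp [pvTailsFold, pvSeq]
  | cons a rest ih =>
      intro g
      rw [pvTailsFold, ih, pvSeq, List.foldl_append, pv_inner_getD]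

lemma pv_clash_symm (ss : List (String × List String)) (a b : String) :
    pvClash ss a b = pvClash ss b a := by
  unfold pvClash
  have : PySem.Set.isdisjoint (pvVal ss a) (pvVal ss b)
       = PySem.Set.isdisjoint (pvVal ss b) (pvVal ss a) := by
    rcases h : PySem.Set.isdisjoint (pvVal ss b) (pvVal ss a) with _ | _
    · rcases h2 : PySem.Set.isdisjoint (pvVal ss a) (pvVal ss b) with _ | _
      · rfl
      · exfalso
        have h2' := (PySem.Set.isdisjoint_iff _ _).mp h2
        have : PySem.Set.isdisjoint (pvVal ss b) (pvVal ss a) = true := by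
          rw [PySem.Set.isdisjoint_iff]
          intro x hx hmem
          exact h2' x hmem hx
        simp [h] at this
    · have h' := (PySem.Set.isdisjoint_iff _ _).mp h
      rw [PySem.Set.isdisjoint_iff]
      intro x hx hmem
      exact h' x hmem hx
  rw [this]

lemma pv_flat_a_eq (ss : List (String × List String)) (s : String) :
    ∀ (rest : List String), (∀ b ∈ rest, b ≠ s) →
      rest.flatMap (pvAdds ss s s) = rest.filter (pvClash ss s) := by
  intro rest
  induction rest with
  | nil => intro _; rfl
  | cons b t ih =>
      intro h
      have hb : b ≠ s := h b (by simp)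
      rw [List.flatMap_cons, ih (fun x hx => h x (by simp [hx])), List.filter_cons]
      unfold pvAdds
      by_cases hc : pvClash ss s b = true
      · simp [hc, hb]
      · simp [hc]

lemma pv_flat_no_s (ss : List (String × List String)) (s a : String) (ha : a ≠ s) :
    ∀ (l : List String), s ∉ l → l.flatMap (pvAdds ss s a) = [] := by
  intro l
  induction l with
  | nil => intro _; rfl
  | cons b t ih =>
      intro h
      have hb : b ≠ s := fun e => h (by simp [e])
      rw [List.flatMap_cons, ih (fun e => h (by simp [e]))]
      unfold pvAdds
      simp [ha, hb]

lemma pv_flat_b (ss : List (String × List String)) (s a : String) (ha : a ≠ s) :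
    ∀ (rest : List String), rest.Nodup → s ∈ rest →
      rest.flatMap (pvAdds ss s a) = if pvClash ss a s then [a] else [] := by
  intro rest
  induction rest with
  | nil => intro _ h; cases h
  | cons b t ih =>
      intro hnd hm
      rcases List.nodup_cons.mp hnd with ⟨hbt, hndt⟩
      rw [List.flatMap_cons]
      by_cases hbs : b = s
      · subst hbs
        rw [pv_flat_no_s ss b a ha t hbt, List.append_nil]
        unfold pvAdds
        simp [ha]
      · have hmt : s ∈ t := by
          rcases hm with _ | hm
          · exact absurd rfl hbs
          · assumption
        rw [ih hndt hmt]
        have : pvAdds ss s a b = [] := by unfold pvAdds; simp [ha, hbs]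
        rw [this, List.nil_append]

lemma pv_seq_not_mem (ss : List (String × List String)) (s : String) :
    ∀ (xs : List String), s ∉ xs → pvSeq ss s xs = [] := by
  intro xs
  induction xs with
  | nil => intro _; rfl
  | cons a rest ih =>
      intro h
      have ha : a ≠ s := fun e => h (by simp [e])
      rw [pvSeq, ih (fun e => h (by simp [e])), pv_flat_no_s ss s a ha rest (fun e => h (by simp [e]))]
      rfl

lemma pv_seq_mem (ss : List (String × List String)) (s : String) :
    ∀ (xs : List String), xs.Nodup → s ∈ xs → pvSeq ss s xs = xs.filter (pvNbr ss s) := by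
  intro xs
  induction xs with
  | nil => intro _ h; cases h
  | cons a rest ih =>
      intro hnd hm
      rcases List.nodup_cons.mp hnd with ⟨har, hndr⟩
      rw [pvSeq, List.filter_cons]
      by_cases hsa : s = a
      · subst hsa
        have hns : s ∉ rest := har
        rw [pv_flat_a_eq ss s rest (fun b hb e => hns (e ▸ hb)), pv_seq_not_mem ss s rest hns,
            List.append_nil]
        have hpn : (pvNbr ss s s) = false := by unfold pvNbr; simp
        rw [hpn]
        simp only [Bool.false_eq_true, if_neg (by simp : ¬ False)]
        apply List.filter_congr
        intro t ht
        unfold pvNbr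
        have : t ≠ s := fun e => hns (e ▸ ht)
        simp [this]
      · have hmt : s ∈ rest := by
          rcases hm with _ | hm
          · exact absurd rfl hsa
          · assumption
        rw [pv_flat_b ss s a (fun e : a = s => hsa e.symm) rest hndr hmt, ih hndr hmt]
        have hpn : pvNbr ss s a = pvClash ss a s := by
          have ha' : (a == s) = false := by
            rw [beq_eq_false_iff_ne]
            exact fun e => hsa e.symm
          unfold pvNbr
          rw [pv_clash_symm, ha']
          simp
        rw [hpn]
        by_cases hc : pvClash ss a s = true
        · simp [hc]
        · simp [hc]

lemma pv_graph0_getD (s : String) :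
    ∀ (l : List String) (g : PySem.Dict String (PySem.Set String)),
      (∀ k, g.getD k [] = []) →
      (l.foldl (fun g s => g.insert s PySem.Set.empty) g).getD s [] = [] := by
  intro l
  induction l with
  | nil => intro g h; exact h s
  | cons x t ih =>
      intro g h
      rw [List.foldl_cons]
      apply ih
      intro k
      rw [PySem.Dict.getD_insert]
      split
      · rfl
      · exact h k

lemma pv_graph0_items :
    ∀ (l : List String) (g : PySem.Dict String (PySem.Set String)),
      l.Nodup → (∀ s ∈ l, g.contains s = false) →
      (l.foldl (fun g s => g.insert s PySem.Set.empty) g).items = g.items ++ l.map (fun s => (s, [])) := by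
  intro l
  induction l with
  | nil => intro g _ _; simp
  | cons x t ih =>
      intro g hnd hc
      rcases List.nodup_cons.mp hnd with ⟨hxt, hndt⟩
      have hc' : ∀ y ∈ t, (g.insert x PySem.Set.empty).contains y = false := by
        intro y hy
        rw [PySem.Dict.contains_insert]
        have hyx : (y == x) = false := by
          rw [beq_eq_false_iff_ne]
          exact fun e => hxt (e ▸ hy)
        rw [hyx, hc y (by simp [hy])]
        rfl
      rw [List.foldl_cons, ih _ hndt hc', PySem.Dict.items_insert_of_not_contains g
          PySem.Set.empty (hc x (by simp)), List.map_cons, List.append_assoc, List.singleton_append]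
      rfl

lemma pv_keys_tails (ss : List (String × List String)) :
    ∀ (xs : List String) (g : PySem.Dict String (PySem.Set String)),
      (∀ x ∈ xs, x ∈ g.keys) → (pvTailsFold (pvH ss) xs g).keys = g.keys := by
  have hstep : ∀ (a b : String) (g : PySem.Dict String (PySem.Set String)),
      a ∈ g.keys → b ∈ g.keys → (pvStepA ss a b g).keys = g.keys := by
    intro a b g ha hb
    unfold pvStepA
    split
    · rw [PySem.Dict.keys_modify, PySem.Dict.keys_insert_of_contains]
      · rw [PySem.Dict.keys_modify, PySem.Dict.keys_insert_of_contains]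
        exact (PySem.Dict.contains_iff_mem_keys g a).mpr ha
      · rw [PySem.Dict.contains_modify]
        rw [(PySem.Dict.contains_iff_mem_keys g b).mpr hb]
        simp
    · rfl
  have hinner : ∀ (a : String) (rest : List String) (g : PySem.Dict String (PySem.Set String)),
      a ∈ g.keys → (∀ x ∈ rest, x ∈ g.keys) → (pvH ss a rest g).keys = g.keys := by
    intro a rest
    induction rest with
    | nil => intro g _ _; rfl
    | cons b t ih =>
        intro g ha hb
        rw [pvH, List.foldl_cons, ← pvH]
        have hk := hstep a b g ha (hb b (by simp))
        rw [ih _ (by rw [hk]; exact ha) (fun x hx => by rw [hk]; exact hb x (by simp [hx])), hk]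
  intro xs
  induction xs with
  | nil => intro g _; rfl
  | cons a rest ih =>
      intro g h
      rw [pvTailsFold]
      have hk := hinner a rest g (h a (by simp)) (fun x hx => h x (by simp [hx]))
      rw [ih _ (fun x hx => by rw [hk]; exact h x (by simp [hx])), hk]

lemma pv_items_eq_keys_map (d : PySem.Dict String (PySem.Set String)) (h : d.keys.Nodup) :
    d.items = d.keys.map (fun k => (k, d.getD k [])) := by
  have hmem : ∀ p ∈ d.items, (p.1, d.getD p.1 []) = p := by
    intro p hp
    have : d.getD p.1 [] = p.2 := PySem.Dict.getD_of_mem_items d (by simpa using hp) h []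
    rw [this]
  calc d.items = d.items.map (fun p => (p.1, d.getD p.1 [])) := by
        rw [List.map_congr_left hmem, List.map_id']
    _ = d.keys.map (fun k => (k, d.getD k [])) := by
        show _ = (d.items.map (fun p => p.1)).map (fun k => (k, d.getD k []))
        rw [List.map_map]
        rfl

theorem pvA_canon (ss : List (String × List String)) (hpre : Pre_build_clash_graph ss) :
    build_clash_graph ss = pvCanon ss := by
  obtain ⟨hk, hv⟩ := hpre
  have h0 := pvA_eq_tails ss ((ss.map (fun p => p.1)).foldl
      (fun g s => g.insert s (PySem.Set.empty : PySem.Set String)) PySem.Dict.empty)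
  have hA : build_clash_graph ss
      = (pvTailsFold (pvH ss) (ss.map (fun p => p.1))
          ((ss.map (fun p => p.1)).foldl (fun g s => g.insert s (PySem.Set.empty : PySem.Set String))
            PySem.Dict.empty)).items :=
    congrArg PySem.Dict.items h0
  rw [hA]
  have hitems0 : ((ss.map (fun p => p.1)).foldl (fun g s => g.insert s (PySem.Set.empty : PySem.Set String))
      PySem.Dict.empty).items = (ss.map (fun p => p.1)).map (fun s => (s, ([] : PySem.Set String))) := by
    rw [pv_graph0_items (ss.map (fun p => p.1)) PySem.Dict.empty hk
        (fun s _ => PySem.Dict.contains_empty s)]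
    rfl
  have hkeys0 : ((ss.map (fun p => p.1)).foldl (fun g s => g.insert s (PySem.Set.empty : PySem.Set String))
      PySem.Dict.empty).keys = ss.map (fun p => p.1) := by
    show (((ss.map (fun p => p.1)).foldl (fun g s => g.insert s (PySem.Set.empty : PySem.Set String))
      PySem.Dict.empty).items).map (fun p => p.1) = _
    rw [hitems0, List.map_map]
    simp
  have hkeysF : (pvTailsFold (pvH ss) (ss.map (fun p => p.1))
      ((ss.map (fun p => p.1)).foldl (fun g s => g.insert s (PySem.Set.empty : PySem.Set String))
        PySem.Dict.empty)).keys = ss.map (fun p => p.1) := by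
    rw [pv_keys_tails ss _ _ (fun x hx => by rw [hkeys0]; exact hx), hkeys0]
  rw [pv_items_eq_keys_map _ (by rw [hkeysF]; exact hk), hkeysF]
  have hget : ∀ s ∈ ss.map (fun p => p.1),
      (pvTailsFold (pvH ss) (ss.map (fun p => p.1))
        ((ss.map (fun p => p.1)).foldl (fun g s => g.insert s (PySem.Set.empty : PySem.Set String))
          PySem.Dict.empty)).getD s [] = (ss.map (fun p => p.1)).filter (pvNbr ss s) := by
    intro s hs
    rw [pv_tails_getD, pv_graph0_getD s _ _ (fun k => PySem.Dict.getD_empty k []),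
        pv_seq_mem ss s _ hk hs, ← PySem.Set.ofList_eq_foldl,
        PySem.Set.ofList_eq_self_of_nodup _ (hk.filter _)]
  rw [List.map_congr_left (fun s hs => by rw [hget s hs] :
      ∀ s ∈ ss.map (fun p => p.1), (s, (pvTailsFold (pvH ss) (ss.map (fun p => p.1))
        ((ss.map (fun p => p.1)).foldl (fun g s => g.insert s (PySem.Set.empty : PySem.Set String))
          PySem.Dict.empty)).getD s []) = (s, (ss.map (fun p => p.1)).filter (pvNbr ss s)))]
  unfold pvCanon
  rw [List.map_map]
  rfl

-- ---------- B side ----------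

lemma pv_co_inner_getD (x : String) :
    ∀ (ks : List String) (co : PySem.Dict String (List String)) (st : String), ks.Nodup →
      (ks.foldl (fun co k => co.modify k [] (fun l => l ++ [x])) co).getD st []
        = if st ∈ ks then co.getD st [] ++ [x] else co.getD st [] := by
  intro ks
  induction ks with
  | nil => intro co st _; simp
  | cons k t ih =>
      intro co st hnd
      rcases List.nodup_cons.mp hnd with ⟨hkt, hndt⟩
      rw [List.foldl_cons, ih _ st hndt]
      by_cases hst : st ∈ t
      · have hne : st ≠ k := fun e => hkt (e ▸ hst)
        rw [if_pos hst, if_pos (by simp [hst]), PySem.Dict.getD_modify, if_neg hne]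
      · rw [if_neg hst, PySem.Dict.getD_modify]
        by_cases he : st = k
        · rw [if_pos he, if_pos (by simp [he]), he]
        · rw [if_neg he, if_neg (by simp [he, hst])]

lemma pv_co_getD :
    ∀ (ss : List (String × List String)) (co : PySem.Dict String (List String)) (st : String),
      (∀ p ∈ ss, p.2.Nodup) →
      (ss.foldl (fun co p => p.2.foldl (fun co st => co.modify st [] (fun l => l ++ [p.1])) co) co).getD st []
        = co.getD st [] ++ (ss.filter (fun p => p.2.contains st)).map (fun p => p.1) := by
  intro ss
  induction ss with
  | nil => intro co st _; simp
  | cons p t ih =>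
      intro co st hnd
      rw [List.foldl_cons, ih _ st (fun q hq => hnd q (by simp [hq])),
          pv_co_inner_getD p.1 p.2 co st (hnd p (by simp)), List.filter_cons]
      by_cases hm : st ∈ p.2
      · rw [if_pos hm, if_pos (by simpa using hm), List.map_cons, List.append_assoc,
            List.singleton_append]
      · rw [if_neg hm, if_neg (by simpa using hm)]

lemma pv_co_inner_keys (x : String) :
    ∀ (ks : List String) (co : PySem.Dict String (List String)) (st : String),
      (st ∈ (ks.foldl (fun co k => co.modify k [] (fun l => l ++ [x])) co).keys ↔ st ∈ co.keys ∨ st ∈ ks) := by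
  intro ks
  induction ks with
  | nil => intro co st; simp
  | cons k t ih =>
      intro co st
      rw [List.foldl_cons, ih, PySem.Dict.keys_modify, PySem.Dict.mem_keys_insert]
      constructor
      · rintro (⟨h | h⟩ | h)
        · subst h; simp
        · exact Or.inl h
        · simp [h]
      · rintro (h | h)
        · exact Or.inl (Or.inr h)
        · rcases List.mem_cons.mp h with h | h
          · exact Or.inl (Or.inl h)
          · exact Or.inr h

lemma pv_co_keys :
    ∀ (ss : List (String × List String)) (co : PySem.Dict String (List String)) (st : String),
      (st ∈ (ss.foldl (fun co p => p.2.foldl (fun co st => co.modify st [] (fun l => l ++ [p.1])) co) co).keys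
        ↔ st ∈ co.keys ∨ ∃ p ∈ ss, st ∈ p.2) := by
  intro ss
  induction ss with
  | nil => intro co st; simp
  | cons p t ih =>
      intro co st
      rw [List.foldl_cons, ih, pv_co_inner_keys]
      constructor
      · rintro (⟨h | h⟩ | ⟨q, hq, hst⟩)
        · exact Or.inl h
        · exact Or.inr ⟨p, by simp, h⟩
        · exact Or.inr ⟨q, by simp [hq], hst⟩
      · rintro (h | ⟨q, hq, hst⟩)
        · exact Or.inl (Or.inl h)
        · rcases List.mem_cons.mp hq with h | h
          · exact Or.inl (Or.inr (h ▸ hst))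
          · exact Or.inr ⟨q, h, hst⟩

lemma pv_val_of_mem (ss : List (String × List String)) (hk : (ss.map (fun p => p.1)).Nodup)
    {x : String} {v : List String} (hm : (x, v) ∈ ss) : pvVal ss x = v := by
  unfold pvVal
  exact PySem.Dict.getD_of_mem_items (PySem.Dict.mk ss) hm hk []

def pvCo (ss : List (String × List String)) : PySem.Dict String (List String) :=
  ss.foldl (fun co p => p.2.foldl (fun co st => co.modify st [] (fun l => l ++ [p.1])) co)
    PySem.Dict.empty

lemma pv_getD_co (ss : List (String × List String)) (hv : ∀ p ∈ ss, p.2.Nodup) (st : String) :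
    (pvCo ss).getD st [] = (ss.filter (fun p => p.2.contains st)).map (fun p => p.1) := by
  unfold pvCo
  rw [pv_co_getD ss PySem.Dict.empty st hv, PySem.Dict.getD_empty, List.nil_append]

lemma pv_mem_co_keys (ss : List (String × List String)) (st : String) :
    st ∈ (pvCo ss).keys ↔ ∃ p ∈ ss, st ∈ p.2 := by
  unfold pvCo
  rw [pv_co_keys]
  have he : (PySem.Dict.empty : PySem.Dict String (List String)).keys = [] := rfl
  rw [he]
  simp

lemma pv_clash_iff (ss : List (String × List String)) (x t : String) :
    pvClash ss x t = true ↔ ∃ st ∈ pvVal ss x, st ∈ pvVal ss t := by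
  unfold pvClash
  rw [Bool.not_eq_eq_eq_not, Bool.not_true, ← Bool.not_eq_true, PySem.Set.isdisjoint_iff]
  push Not
  rfl

def pvNb (ss : List (String × List String)) : PySem.Dict String (PySem.Set String) :=
  (pvCo ss).keys.foldl (fun g st =>
    ((pvCo ss).getD st []).foldl
      (fun g a => g.modify a [] (fun x => PySem.Set.update x ((pvCo ss).getD st []))) g)
    ((ss.map (fun p => p.1)).foldl (fun g s => g.insert s PySem.Set.empty) PySem.Dict.empty)

lemma pv_nb_inner_mem (subs : List String) (t s : String) :
    ∀ (l : List String) (g : PySem.Dict String (PySem.Set String)),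
      (t ∈ (l.foldl (fun g a => g.modify a [] (fun x => PySem.Set.update x subs)) g).getD s []
        ↔ t ∈ g.getD s [] ∨ (s ∈ l ∧ t ∈ subs)) := by
  intro l
  induction l with
  | nil => intro g; simp
  | cons a l' ih =>
      intro g
      rw [List.foldl_cons, ih, PySem.Dict.getD_modify]
      by_cases hsa : s = a
      · subst hsa
        rw [if_pos rfl, PySem.Set.mem_update]
        constructor
        · rintro ((h | h) | ⟨_, h⟩)
          · exact Or.inl h
          · exact Or.inr ⟨by simp, h⟩
          · exact Or.inr ⟨by simp, h⟩
        · rintro (h | ⟨_, h⟩)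
          · exact Or.inl (Or.inl h)
          · exact Or.inl (Or.inr h)
      · rw [if_neg hsa]
        constructor
        · rintro (h | ⟨h1, h2⟩)
          · exact Or.inl h
          · exact Or.inr ⟨by simp [h1], h2⟩
        · rintro (h | ⟨h1, h2⟩)
          · exact Or.inl h
          · rcases List.mem_cons.mp h1 with e | m
            · exact absurd e hsa
            · exact Or.inr ⟨m, h2⟩

lemma pv_nb_mem (ss : List (String × List String)) (t s : String) :
    ∀ (ks : List String) (g : PySem.Dict String (PySem.Set String)),
      (t ∈ (ks.foldl (fun g st =>
          ((pvCo ss).getD st []).foldl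
            (fun g a => g.modify a [] (fun x => PySem.Set.update x ((pvCo ss).getD st []))) g)
          g).getD s []
        ↔ t ∈ g.getD s [] ∨ ∃ st ∈ ks, s ∈ (pvCo ss).getD st [] ∧ t ∈ (pvCo ss).getD st []) := by
  intro ks
  induction ks with
  | nil => intro g; simp
  | cons k t' ih =>
      intro g
      rw [List.foldl_cons, ih, pv_nb_inner_mem]
      constructor
      · rintro ((h | h) | ⟨st, hst, h⟩)
        · exact Or.inl h
        · exact Or.inr ⟨k, by simp, h⟩
        · exact Or.inr ⟨st, by simp [hst], h⟩
      · rintro (h | ⟨st, hst, h⟩)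
        · exact Or.inl (Or.inl h)
        · rcases List.mem_cons.mp hst with e | m
          · exact Or.inl (Or.inr (e ▸ h))
          · exact Or.inr ⟨st, m, h⟩

lemma pv_pred (ss : List (String × List String)) (hk : (ss.map (fun p => p.1)).Nodup)
    (hv : ∀ p ∈ ss, p.2.Nodup) (x t : String)
    (hx : ∃ p ∈ ss, p.1 = x) (ht : ∃ q ∈ ss, q.1 = t) :
    (PySem.Set.contains ((pvNb ss).getD x []) t && !(t == x)) = pvNbr ss x t := by
  have hmem : t ∈ (pvNb ss).getD x [] ↔
      ∃ st ∈ (pvCo ss).keys, x ∈ (pvCo ss).getD st [] ∧ t ∈ (pvCo ss).getD st [] := by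
    unfold pvNb
    rw [pv_nb_mem, pv_graph0_getD x (ss.map (fun p => p.1)) PySem.Dict.empty
        (fun k => PySem.Dict.getD_empty k [])]
    simp
  have hA : ∀ (st y : String), (y ∈ (pvCo ss).getD st [] ↔ ∃ q ∈ ss, q.1 = y ∧ st ∈ q.2) := by
    intro st y
    rw [pv_getD_co ss hv]
    simp [List.mem_filter]
  have hnbr : pvNbr ss x t = true ↔ (t ≠ x ∧ pvClash ss x t = true) := by
    unfold pvNbr
    simp
  rw [Bool.eq_iff_iff]
  rw [Bool.and_eq_true, PySem.Set.contains_iff, hmem, hnbr, pv_clash_iff]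
  have hbang : ((!(t == x)) = true) ↔ t ≠ x := by simp
  rw [hbang]
  constructor
  · rintro ⟨⟨st, hst, hxm, htm⟩, hne⟩
    rcases (hA st x).mp hxm with ⟨p, hp, hpx, hpst⟩
    rcases (hA st t).mp htm with ⟨q, hq, hqt, hqst⟩
    refine ⟨hne, st, ?_, ?_⟩
    · rw [← hpx, pv_val_of_mem ss hk (x := p.1) (v := p.2) (by simpa using hp)]
      exact hpst
    · rw [← hqt, pv_val_of_mem ss hk (x := q.1) (v := q.2) (by simpa using hq)]
      exact hqst
  · rintro ⟨hne, st, hsx, hst⟩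
    rcases hx with ⟨p, hp, hpx⟩
    rcases ht with ⟨q, hq, hqt⟩
    have hvx : pvVal ss x = p.2 := by
      rw [← hpx]
      exact pv_val_of_mem ss hk (x := p.1) (v := p.2) (by simpa using hp)
    have hvt : pvVal ss t = q.2 := by
      rw [← hqt]
      exact pv_val_of_mem ss hk (x := q.1) (v := q.2) (by simpa using hq)
    refine ⟨⟨st, ?_, ?_, ?_⟩, hne⟩
    · rw [pv_mem_co_keys]
      exact ⟨p, hp, by rw [← hvx]; exact hsx⟩
    · exact (hA st x).mpr ⟨p, hp, hpx, by rw [← hvx]; exact hsx⟩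
    · exact (hA st t).mpr ⟨q, hq, hqt, by rw [← hvt]; exact hst⟩

theorem pvB_canon (ss : List (String × List String)) (hpre : Pre_build_clash_graph ss) :
    build_clash_graph_alt ss = pvCanon ss := by
  obtain ⟨hk, hv⟩ := hpre
  show ss.map (fun p =>
      (p.1, PySem.Set.ofList ((ss.map (fun q => q.1)).filter
        (fun t => PySem.Set.contains ((pvNb ss).getD p.1 []) t && !(t == p.1))))) = pvCanon ss
  unfold pvCanon
  apply List.map_congr_left
  intro p hp
  have hfc : (ss.map (fun q => q.1)).filter
        (fun t => PySem.Set.contains ((pvNb ss).getD p.1 []) t && !(t == p.1))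
      = (ss.map (fun q => q.1)).filter (pvNbr ss p.1) := by
    apply List.filter_congr
    intro t ht
    rcases List.mem_map.mp ht with ⟨q, hq, hqt⟩
    exact pv_pred ss hk hv p.1 t ⟨p, hp, rfl⟩ ⟨q, hq, hqt⟩
  rw [hfc, PySem.Set.ofList_eq_self_of_nodup _ (hk.filter _)]

-- ===== VERDICT (by name: the statement is the Claim_ definition above) =====
theorem build_clash_graph_spec : Claim_equal_build_clash_graph := by
  intro ss _ hpre
  unfold Spec_build_clash_graph
  rw [pvA_canon ss hpre, pvB_canon ss hpre]
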